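-- pv_equiv track=rewrite | github.com/rlemke/facetwork | facetwork/resolver.py | _namespace_candidates_from_qualified
-- ===== SOURCE A (Python) =====
-- def _namespace_candidates_from_qualified(name: str) -> list[str]:
--     """Extract candidate namespace names from a qualified call expression.
--
--     For ``"a.b.c.Facet"``, returns ``["a.b.c", "a.b", "a"]`` — longest
--     prefix first.  Simple unqualified names (no dots) return an empty list.
--     """
--     parts = name.split(".")
--     if len(parts) <= 1:
--         return []
--     # The last component is the facet name; everything before is a potential
--     # namespace prefix (progressively shorter).
--     candidates: list[str] = []
--     for i in range(len(parts) - 1, 0, -1):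
--         candidates.append(".".join(parts[:i]))
--     return candidates
-- ===== SOURCE B (Python) =====
-- def _namespace_candidates_from_qualified(name: str) -> list[str]:
--     """Trim the last dotted component repeatedly instead of splitting and
--     re-joining every prefix."""
--     candidates: list[str] = []
--     prefix = name
--     i = prefix.rfind(".")
--     while i >= 0:
--         prefix = prefix[:i]
--         candidates.append(prefix)
--         i = prefix.rfind(".")
--     return candidates
-- ===== Notes on version B (the rewrite author's own statement) =====
-- stated objective: alternative
-- what changed: B keeps a single shrinking prefix string and repeatedly trims it back to its last dot (rfind + prefix slice), instead of splitting the name into parts and re-joining every prefix from the parts list.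
import Mathlib
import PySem

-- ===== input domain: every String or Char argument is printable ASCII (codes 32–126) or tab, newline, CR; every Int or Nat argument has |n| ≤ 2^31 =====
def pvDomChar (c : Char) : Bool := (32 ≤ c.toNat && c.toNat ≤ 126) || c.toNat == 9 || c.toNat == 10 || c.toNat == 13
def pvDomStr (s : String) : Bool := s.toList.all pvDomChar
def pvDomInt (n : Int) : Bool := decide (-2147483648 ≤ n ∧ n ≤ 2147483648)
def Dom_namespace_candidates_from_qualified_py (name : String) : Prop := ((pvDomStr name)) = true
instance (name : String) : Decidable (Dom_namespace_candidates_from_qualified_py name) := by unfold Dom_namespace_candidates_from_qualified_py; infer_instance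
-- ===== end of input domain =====

-- B repeatedly trims the last dotted component in place (rfind + prefix slice) instead of
-- splitting into parts and re-joining every prefix (objective: alternative decomposition).

-- ===== PORT A =====
-- name.split(".") with the literal non-empty separator "." is PySem.Chars.splitOn on code
-- points (exact); ".".join(…) is PySem.Chars.join; parts[:i] is PySem.List.slice.
def namespace_candidates_from_qualified_py (name : String) : List String :=
  let parts := PySem.Chars.splitOn name.toList ['.']
  if parts.length ≤ 1 then []
  else
    (PySem.List.pyRange ((parts.length : Int) - 1) 0 (-1)).foldl
      (fun acc i =>
        acc ++ [String.ofList (PySem.Chars.join ['.'] (PySem.List.slice parts none (some i)))]) []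

-- ===== PORT B =====
-- Termination fact for B's while-loop, cited by pvAltGo's decreasing_by: a found "."
-- sits strictly below the length, so the sliced prefix is strictly shorter.
theorem pv_rfind_go_dot_lt (s : List Char) : ∀ j : Nat, j ≤ s.length →
    0 ≤ PySem.Chars.rfind.go s ['.'] j → (PySem.Chars.rfind.go s ['.'] j).toNat < s.length := by
  intro j
  induction j with
  | zero =>
    intro _ h0
    simp only [PySem.Chars.rfind.go] at h0 ⊢
    by_cases hp : List.isPrefixOf ['.'] s = true
    · rw [if_pos hp] at h0 ⊢
      rcases s with _ | ⟨c, t⟩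
      · simp [List.isPrefixOf] at hp
      · simp
    · rw [if_neg hp] at h0
      omega
  | succ j ih =>
    intro hj h0
    simp only [PySem.Chars.rfind.go] at h0 ⊢
    by_cases hp : List.isPrefixOf ['.'] (List.drop (j+1) s) = true
    · rw [if_pos hp] at h0 ⊢
      have hne : List.drop (j+1) s ≠ [] := by
        intro hnil; rw [hnil] at hp; simp [List.isPrefixOf] at hp
      have : j + 1 < s.length := by
        by_contra hc
        exact hne (List.drop_eq_nil_of_le (by omega))
      simpa using this
    · rw [if_neg hp] at h0 ⊢
      exact ih (by omega) h0

theorem pv_rfind_dot_lt (cs : List Char) (h : 0 ≤ PySem.Chars.rfind cs ['.']) :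
    (PySem.Chars.rfind cs ['.']).toNat < cs.length := by
  have := pv_rfind_go_dot_lt cs cs.length le_rfl
  simpa [PySem.Chars.rfind] using this (by simpa [PySem.Chars.rfind] using h)

-- B's loop: i = prefix.rfind("."); while i >= 0: prefix = prefix[:i]; candidates.append(prefix).
def pvAltGo (cs : List Char) : List String :=
  let i := PySem.Chars.rfind cs ['.']
  if h : 0 ≤ i then
    let p := PySem.List.slice cs none (some i)
    String.ofList p :: pvAltGo p
  else []
termination_by cs.length
decreasing_by
  have h' : 0 ≤ PySem.Chars.rfind cs ['.'] := h
  have := pv_rfind_dot_lt cs h'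
  rw [PySem.List.slice_to cs h']
  simp [List.length_take]; omega


def namespace_candidates_from_qualified_py_alt (name : String) : List String :=
  pvAltGo name.toList

-- ===== PRECONDITION & SPEC =====
def Spec_namespace_candidates_from_qualified_py (name : String) (out : List String) : Prop := out = namespace_candidates_from_qualified_py_alt name
instance (name : String) (out : List String) : Decidable (Spec_namespace_candidates_from_qualified_py name out) := by unfold Spec_namespace_candidates_from_qualified_py; infer_instance

-- ===== CLAIM (what is proved, stated in full; the proofs are below) =====
def Claim_equal_namespace_candidates_from_qualified_py : Prop := ∀ (name : String), Dom_namespace_candidates_from_qualified_py name → Spec_namespace_candidates_from_qualified_py name (namespace_candidates_from_qualified_py name)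

-- ===== LEMMAS AND PROOFS =====

-- A reference split-on-"." and the facts that tie both ports to it: the split is never
-- empty, joining it back gives the string, and no part contains a dot.
def pvSplitDot : List Char → List (List Char)
  | [] => [[]]
  | c :: rest => if c = '.' then [] :: pvSplitDot rest else (pvSplitDot rest).modifyHead (c :: ·)

theorem pvSplitDot_ne_nil (cs : List Char) : pvSplitDot cs ≠ [] := by
  induction cs with
  | nil => simp [pvSplitDot]
  | cons c rest ih =>
    simp only [pvSplitDot]
    split
    · simp
    · rcases h : pvSplitDot rest with _ | ⟨p, ps⟩
      · exact absurd h ih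
      · simp

theorem pv_join_pvSplitDot (cs : List Char) :
    PySem.Chars.join ['.'] (pvSplitDot cs) = cs := by
  induction cs with
  | nil => simp [pvSplitDot, PySem.Chars.join, List.intercalate]
  | cons c rest ih =>
    simp only [pvSplitDot]
    rcases h : pvSplitDot rest with _ | ⟨p, ps⟩
    · exact absurd h (pvSplitDot_ne_nil rest)
    · rw [h] at ih
      by_cases hc : c = '.'
      · subst hc
        rw [if_pos rfl, PySem.Chars.join_cons_cons, ih]
        simp
      · rw [if_neg hc]
        simp only [List.modifyHead]
        rcases ps with _ | ⟨q, qs⟩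
        · simp only [PySem.Chars.join_singleton] at ih ⊢
          simp [ih]
        · rw [PySem.Chars.join_cons_cons] at ih ⊢
          rw [show (c :: p) ++ ['.'] ++ PySem.Chars.join ['.'] (q :: qs)
              = c :: (p ++ ['.'] ++ PySem.Chars.join ['.'] (q :: qs)) by simp, ih]

theorem pv_not_dot_mem_pvSplitDot (cs : List Char) :
    ∀ p ∈ pvSplitDot cs, '.' ∉ p := by
  induction cs with
  | nil => intro p hp; simp [pvSplitDot] at hp; simp [hp]
  | cons c rest ih =>
    intro p hp
    simp only [pvSplitDot] at hp
    by_cases hc : c = '.'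
    · rw [if_pos hc] at hp
      rcases List.mem_cons.mp hp with h1 | h1
      · simp [h1]
      · exact ih p h1
    · rw [if_neg hc] at hp
      rcases h : pvSplitDot rest with _ | ⟨q, qs⟩
      · exact absurd h (pvSplitDot_ne_nil rest)
      · rw [h] at hp
        simp only [List.modifyHead] at hp
        rcases List.mem_cons.mp hp with h1 | h1
        · subst h1
          intro hmem
          rcases List.mem_cons.mp hmem with h2 | h2
          · exact hc h2.symm
          · exact ih q (by simp [h]) h2
        · exact ih p (by simp [h, h1])

theorem pv_splitOn_go_eq (fuel : Nat) : ∀ (l cur : List Char) (acc : List (List Char)),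
    l.length ≤ fuel →
    PySem.Chars.splitOn.go ['.'] fuel l cur acc
      = acc.reverse ++ (pvSplitDot l).modifyHead (cur.reverse ++ ·) := by
  induction fuel with
  | zero =>
    intro l cur acc hl
    have : l = [] := List.length_eq_zero_iff.mp (by omega)
    subst this
    simp [PySem.Chars.splitOn.go, pvSplitDot]
  | succ fuel ih =>
    intro l cur acc hl
    rcases l with _ | ⟨c, rest⟩
    · simp [PySem.Chars.splitOn.go, pvSplitDot]
    · simp only [PySem.Chars.splitOn.go]
      by_cases hc : c = '.'
      · subst hc
        have hpre : List.isPrefixOf ['.'] ('.' :: rest) = true := by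
          simp [List.isPrefixOf]
        rw [if_pos hpre]
        have hdrop : List.drop ['.'].length ('.' :: rest) = rest := by simp
        rw [hdrop]
        rw [ih rest [] (cur.reverse :: acc) (by simp at hl ⊢; omega)]
        rcases h : pvSplitDot rest with _ | ⟨p, ps⟩
        · exact absurd h (pvSplitDot_ne_nil rest)
        · simp [pvSplitDot, h]
      · have hpre : List.isPrefixOf ['.'] (c :: rest) = false := by
          simp [List.isPrefixOf]; intro h; exact absurd h.symm hc
        rw [if_neg (by simp [hpre])]
        rw [ih rest (c :: cur) acc (by simp at hl ⊢; omega)]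
        rcases h : pvSplitDot rest with _ | ⟨p, ps⟩
        · exact absurd h (pvSplitDot_ne_nil rest)
        · simp [pvSplitDot, h, if_neg hc]

theorem pv_splitOn_eq (cs : List Char) :
    PySem.Chars.splitOn cs ['.'] = pvSplitDot cs := by
  have := pv_splitOn_go_eq (cs.length + 1) cs [] [] (by omega)
  rcases h : pvSplitDot cs with _ | ⟨p, ps⟩
  · exact absurd h (pvSplitDot_ne_nil cs)
  · simpa [PySem.Chars.splitOn, h] using this

theorem pv_rfind_go_no_dot (s : List Char) (hs : '.' ∉ s) :
    ∀ j : Nat, PySem.Chars.rfind.go s ['.'] j = -1 := by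
  intro j
  induction j with
  | zero =>
    simp only [PySem.Chars.rfind.go]
    by_cases hp : List.isPrefixOf ['.'] s = true
    · exfalso
      rcases List.isPrefixOf_iff_prefix.mp hp with ⟨t, ht⟩
      exact hs (by rw [← ht]; simp)
    · rw [if_neg hp]
  | succ j ih =>
    simp only [PySem.Chars.rfind.go]
    by_cases hp : List.isPrefixOf ['.'] (List.drop (j+1) s) = true
    · exfalso
      rcases List.isPrefixOf_iff_prefix.mp hp with ⟨t, ht⟩
      have : '.' ∈ List.drop (j+1) s := by rw [← ht]; simp
      exact hs (List.mem_of_mem_drop this)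
    · rw [if_neg hp]
      exact ih

theorem pv_rfind_no_dot (cs : List Char) (hs : '.' ∉ cs) :
    PySem.Chars.rfind cs ['.'] = -1 := by
  simp [PySem.Chars.rfind, pv_rfind_go_no_dot cs hs]

theorem pv_rfind_go_last_dot (xs ys : List Char) (hys : '.' ∉ ys) :
    ∀ d : Nat, PySem.Chars.rfind.go (xs ++ '.' :: ys) ['.'] (xs.length + d) = xs.length := by
  intro d
  induction d with
  | zero =>
    rcases xs with _ | ⟨c, rest⟩
    · simp [PySem.Chars.rfind.go, List.isPrefixOf]
    · have hdrop : List.drop (rest.length + 1) ((c :: rest) ++ '.' :: ys) = '.' :: ys := by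
        rw [show (c :: rest) ++ '.' :: ys = (c :: rest) ++ '.' :: ys from rfl]
        rw [show rest.length + 1 = (c :: rest).length by simp, List.drop_append]
        simp
      simp only [Nat.add_zero, List.length_cons, PySem.Chars.rfind.go, hdrop]
      simp [List.isPrefixOf]
  | succ d ih =>
    rw [show xs.length + (d + 1) = (xs.length + d) + 1 by omega]
    simp only [PySem.Chars.rfind.go]
    have hpre : ¬ List.isPrefixOf ['.'] (List.drop (xs.length + d + 1) (xs ++ '.' :: ys)) = true := by
      intro hp
      rcases List.isPrefixOf_iff_prefix.mp hp with ⟨t, ht⟩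
      have hmem : '.' ∈ List.drop (xs.length + d + 1) (xs ++ '.' :: ys) := by rw [← ht]; simp
      have heq : List.drop (xs.length + d + 1) (xs ++ '.' :: ys) = List.drop (d + 1) ('.' :: ys) := by
        rw [show xs.length + d + 1 = xs.length + (d + 1) by omega, List.drop_append]
        rw [List.drop_eq_nil_of_le (by omega)]
        simp
      rw [heq] at hmem
      simp only [List.drop_succ_cons] at hmem
      exact hys (List.mem_of_mem_drop hmem)
    rw [if_neg hpre]
    exact ih

theorem pv_rfind_last_dot (xs ys : List Char) (hys : '.' ∉ ys) :
    PySem.Chars.rfind (xs ++ '.' :: ys) ['.'] = xs.length := by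
  have hlen : (xs ++ '.' :: ys).length = xs.length + (ys.length + 1) := by simp
  have := pv_rfind_go_last_dot xs ys hys (ys.length + 1)
  simpa [PySem.Chars.rfind, hlen] using this

theorem pv_join_append_singleton (xs : List (List Char)) (x : List Char) (hx : xs ≠ []) :
    PySem.Chars.join ['.'] (xs ++ [x]) = PySem.Chars.join ['.'] xs ++ '.' :: x := by
  induction xs with
  | nil => exact absurd rfl hx
  | cons a rest ih =>
    rcases rest with _ | ⟨b, t⟩
    · simp [PySem.Chars.join_singleton, PySem.Chars.join_cons_cons]
    · rw [show (a :: b :: t) ++ [x] = a :: ((b :: t) ++ [x]) by simp]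
      rw [show (b :: t) ++ [x] = b :: (t ++ [x]) by simp]
      rw [PySem.Chars.join_cons_cons]
      rw [show b :: (t ++ [x]) = (b :: t) ++ [x] by simp]
      rw [ih (by simp), PySem.Chars.join_cons_cons]
      simp

def pvMapForm (parts : List (List Char)) : List String :=
  (List.range (parts.length - 1)).map
    (fun k => String.ofList (PySem.Chars.join ['.'] (parts.take (parts.length - 1 - k))))

theorem pv_altGo_join (parts : List (List Char)) (hne : parts ≠ [])
    (hdot : ∀ p ∈ parts, '.' ∉ p) :
    pvAltGo (PySem.Chars.join ['.'] parts) = pvMapForm parts := by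
  induction parts using List.reverseRecOn with
  | nil => exact absurd rfl hne
  | append_singleton xs x ih =>
    rcases xs with _ | ⟨a, t⟩
    · have hx : '.' ∉ x := hdot x (by simp)
      rw [pvAltGo]
      simp only [List.nil_append, PySem.Chars.join_singleton]
      rw [dif_neg (by rw [pv_rfind_no_dot x hx]; omega)]
      simp [pvMapForm]
    · set ys := a :: t with hys
      have hysne : ys ≠ [] := by simp [hys]
      have hx : '.' ∉ x := hdot x (by simp)
      rw [pv_join_append_singleton ys x hysne]
      rw [pvAltGo]
      have hrf : PySem.Chars.rfind (PySem.Chars.join ['.'] ys ++ '.' :: x) ['.']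
          = (PySem.Chars.join ['.'] ys).length := pv_rfind_last_dot _ x hx
      simp only [hrf]
      rw [dif_pos (by omega)]
      have hslice : PySem.List.slice (PySem.Chars.join ['.'] ys ++ '.' :: x) none
          (some ((PySem.Chars.join ['.'] ys).length : Int))
          = PySem.Chars.join ['.'] ys := by
        rw [PySem.List.slice_to _ (by omega)]
        simp [List.take_left']
      rw [hslice]
      rw [ih hysne (fun p hp => hdot p (by simp [hp]))]
      simp only [pvMapForm]
      have hlen : (ys ++ [x]).length - 1 = ys.length := by simp
      rw [hlen]
      have hlpos : ys.length = (ys.length - 1) + 1 := by simp [hys]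
      rw [hlpos, List.range_succ_eq_map]
      simp only [List.map_cons, List.map_map]
      congr 1
      · congr 1
        rw [show (ys.length - 1) + 1 - 0 = ys.length by omega]
        rw [List.take_left']
        rfl
      · apply List.map_congr_left
        intro k hk
        have hk' : k < ys.length - 1 := List.mem_range.mp hk
        simp only [Function.comp]
        congr 2
        rw [show (ys.length - 1) + 1 - (k + 1) = ys.length - 1 - k by omega]
        rw [List.take_append_of_le_length (by omega)]
        congr 1

theorem pv_pyRange_down (n : Nat) :
    PySem.List.pyRange (n : Int) 0 (-1) = (List.range n).map (fun k : Nat => (n : Int) - (k : Int)) := by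
  simp only [PySem.List.pyRange]
  rw [if_neg (by omega)]
  rcases Nat.eq_zero_or_pos n with h | h
  · subst h; simp
  · rw [if_neg (by omega), if_pos (by exact_mod_cast h)]
    have hcnt : (((n : Int) - 0 + -(-1) - 1) / -(-1)).toNat = n := by simp
    rw [hcnt]
    apply List.map_congr_left
    intro k _
    ring


-- ===== VERDICT (by name: the statement is the Claim_ definition above) =====
theorem namespace_candidates_from_qualified_py_spec : Claim_equal_namespace_candidates_from_qualified_py := by
  intro name _
  unfold Spec_namespace_candidates_from_qualified_py
  unfold namespace_candidates_from_qualified_py namespace_candidates_from_qualified_py_alt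
  set cs := name.toList with hcs
  set parts := pvSplitDot cs with hparts
  have hsplit : PySem.Chars.splitOn cs ['.'] = parts := pv_splitOn_eq cs
  have hjoin : PySem.Chars.join ['.'] parts = cs := pv_join_pvSplitDot cs
  have hne : parts ≠ [] := pvSplitDot_ne_nil cs
  have hdot : ∀ p ∈ parts, '.' ∉ p := pv_not_dot_mem_pvSplitDot cs
  have hB : pvAltGo cs = pvMapForm parts := by
    rw [← hjoin]; exact pv_altGo_join parts hne hdot
  simp only [hsplit]
  by_cases hlen : parts.length ≤ 1
  · rw [if_pos hlen, hB]
    have h0 : parts.length - 1 = 0 := by omega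
    simp [pvMapForm, h0]
  · rw [if_neg hlen, hB]
    have h1 : ((parts.length : Int) - 1) = ((parts.length - 1 : Nat) : Int) := by
      push_cast [Nat.cast_sub (by omega : 1 ≤ parts.length)]; ring
    rw [h1, pv_pyRange_down (parts.length - 1)]
    rw [PySem.List.foldl_append_singleton_eq_map]
    simp only [List.nil_append, List.map_map, pvMapForm]
    apply List.map_congr_left
    intro k hk
    have hk' : k < parts.length - 1 := List.mem_range.mp hk
    simp only [Function.comp]
    congr 2
    have hnn : (0 : Int) ≤ ((parts.length - 1 : Nat) : Int) - (k : Int) := by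
      omega
    rw [PySem.List.slice_to _ hnn]
    congr 1
    omega
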